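-- pv_equiv track=rewrite | github.com/vxgmichel/gambatte-terminal | gambaterm/sextant.py | _visual_pixel_diff
-- ===== SOURCE A (Python) =====
-- def _visual_pixel_diff(
--     bg1: int, fg1: int, idx1: int,
--     bg2: int, fg2: int, idx2: int,
-- ) -> int:
--     """Count pixel positions where the displayed color differs.
--
--     Each sextant cell has 6 pixel positions (bits 0-5). For each position,
--     the displayed color is fg if the bit is set, bg otherwise. Returns the
--     number of positions (0-6) where the old and new displayed colors differ.
--
--     :param bg1: Previous background color.
--     :param fg1: Previous foreground color.
--     :param idx1: Previous sextant index.
--     :param bg2: New background color.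
--     :param fg2: New foreground color.
--     :param idx2: New sextant index.
--     :returns: Number of pixel positions with different displayed colors.
--     """
--     diff = 0
--     for b in range(6):
--         old_color = fg1 if (idx1 >> b) & 1 else bg1
--         new_color = fg2 if (idx2 >> b) & 1 else bg2
--         if old_color != new_color:
--             diff += 1
--     return diff
-- ===== SOURCE B (Python) =====
-- def _visual_pixel_diff(
--     bg1: int, fg1: int, idx1: int,
--     bg2: int, fg2: int, idx2: int,
-- ) -> int:
--     """Count pixel positions where the displayed color differs.
--
--     Branch-free reformulation: classify the 6 bit positions by their
--     (old bit, new bit) pair with popcounts over the masked sextant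
--     indices, then charge each class its color-inequality indicator.
--     """
--     n11 = ((idx1 & idx2) & 0x3F).bit_count()
--     n10 = ((idx1 & ~idx2) & 0x3F).bit_count()
--     n01 = ((~idx1 & idx2) & 0x3F).bit_count()
--     n00 = ((~idx1 & ~idx2) & 0x3F).bit_count()
--     return (n11 * (fg1 != fg2) + n10 * (fg1 != bg2)
--             + n01 * (bg1 != fg2) + n00 * (bg1 != bg2))
-- ===== Notes on version B (the rewrite author's own statement) =====
-- stated objective: alternative
-- what changed: Replaces the per-bit loop with branch-free bitwise classification: four popcounts over the masked low 6 bits (old/new bit pair categories) each multiplied by its color-inequality indicator.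
import Mathlib
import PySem

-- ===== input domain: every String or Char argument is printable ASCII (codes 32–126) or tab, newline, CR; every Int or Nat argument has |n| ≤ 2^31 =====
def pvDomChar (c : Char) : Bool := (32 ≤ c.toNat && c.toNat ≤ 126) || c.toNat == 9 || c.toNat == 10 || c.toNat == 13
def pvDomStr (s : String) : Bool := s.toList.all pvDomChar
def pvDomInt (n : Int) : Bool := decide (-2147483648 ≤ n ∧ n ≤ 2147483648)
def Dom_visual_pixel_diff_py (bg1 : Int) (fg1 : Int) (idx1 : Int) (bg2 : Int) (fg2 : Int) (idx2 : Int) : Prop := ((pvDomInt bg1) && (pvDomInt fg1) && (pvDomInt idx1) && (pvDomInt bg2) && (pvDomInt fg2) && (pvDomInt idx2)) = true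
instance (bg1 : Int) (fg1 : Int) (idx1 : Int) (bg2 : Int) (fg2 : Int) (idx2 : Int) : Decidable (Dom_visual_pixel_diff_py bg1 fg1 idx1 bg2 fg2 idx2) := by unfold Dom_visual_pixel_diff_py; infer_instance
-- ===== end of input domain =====

-- B replaces A's per-bit loop with four popcounts over the masked low 6 bits, one per
-- (old bit, new bit) category, each multiplied by its color-inequality indicator (alternative
-- formulation, same O(1) cost).

-- ===== PORT A =====
def visual_pixel_diff_py (bg1 : Int) (fg1 : Int) (idx1 : Int) (bg2 : Int) (fg2 : Int) (idx2 : Int) : Int :=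
  (PySem.List.pyRange 0 6 1).foldl (fun diff b =>
    let old_color : Int := if PySem.Int.band (idx1 >>> b.toNat) 1 ≠ 0 then fg1 else bg1
    let new_color : Int := if PySem.Int.band (idx2 >>> b.toNat) 1 ≠ 0 then fg2 else bg2
    if old_color ≠ new_color then diff + 1 else diff) 0

-- ===== PORT B =====
def visual_pixel_diff_py_alt (bg1 : Int) (fg1 : Int) (idx1 : Int) (bg2 : Int) (fg2 : Int) (idx2 : Int) : Int :=
  let n11 : Int := (PySem.Int.bitCount (PySem.Int.band (PySem.Int.band idx1 idx2) 63) : Int)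
  let n10 : Int := (PySem.Int.bitCount (PySem.Int.band (PySem.Int.band idx1 (Int.not idx2)) 63) : Int)
  let n01 : Int := (PySem.Int.bitCount (PySem.Int.band (PySem.Int.band (Int.not idx1) idx2) 63) : Int)
  let n00 : Int := (PySem.Int.bitCount (PySem.Int.band (PySem.Int.band (Int.not idx1) (Int.not idx2)) 63) : Int)
  n11 * (if fg1 ≠ fg2 then 1 else 0) + n10 * (if fg1 ≠ bg2 then 1 else 0)
    + n01 * (if bg1 ≠ fg2 then 1 else 0) + n00 * (if bg1 ≠ bg2 then 1 else 0)

-- ===== PRECONDITION & SPEC =====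
def Spec_visual_pixel_diff_py (bg1 : Int) (fg1 : Int) (idx1 : Int) (bg2 : Int) (fg2 : Int) (idx2 : Int) (out : Int) : Prop := out = visual_pixel_diff_py_alt bg1 fg1 idx1 bg2 fg2 idx2
instance (bg1 : Int) (fg1 : Int) (idx1 : Int) (bg2 : Int) (fg2 : Int) (idx2 : Int) (out : Int) : Decidable (Spec_visual_pixel_diff_py bg1 fg1 idx1 bg2 fg2 idx2 out) := by unfold Spec_visual_pixel_diff_py; infer_instance

-- ===== CLAIM (what is proved, stated in full; the proofs are below) =====
def Claim_equal_visual_pixel_diff_py : Prop := ∀ (bg1 : Int) (fg1 : Int) (idx1 : Int) (bg2 : Int) (fg2 : Int) (idx2 : Int), Dom_visual_pixel_diff_py bg1 fg1 idx1 bg2 fg2 idx2 → Spec_visual_pixel_diff_py bg1 fg1 idx1 bg2 fg2 idx2 (visual_pixel_diff_py bg1 fg1 idx1 bg2 fg2 idx2)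

-- ===== LEMMAS AND PROOFS =====

-- x + y = x ||| y when x and y share no bits
lemma pv_disj_add (x : Nat) : ∀ y : Nat, x &&& y = 0 → x + y = x ||| y := by
  induction x using Nat.strong_induction_on with
  | _ x ih =>
    intro y h
    by_cases hx : x = 0
    · subst hx; simp
    · have h2 : x / 2 &&& y / 2 = 0 := by rw [← Nat.and_div_two, h]
      have IH := ih (x / 2) (Nat.div_lt_self (Nat.pos_of_ne_zero hx) (by norm_num)) (y / 2) h2
      have hand := Nat.testBit_and x y 0
      rw [h] at hand
      simp only [Nat.testBit_zero] at hand
      have hor0 := Nat.testBit_or x y 0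
      simp only [Nat.testBit_zero] at hor0
      have hordiv : (x ||| y) / 2 = x / 2 ||| y / 2 := Nat.or_div_two
      have hx2 := Nat.div_add_mod x 2
      have hy2 := Nat.div_add_mod y 2
      have ho2 := Nat.div_add_mod (x ||| y) 2
      have hbx : x % 2 < 2 := Nat.mod_lt _ (by norm_num)
      have hby : y % 2 < 2 := Nat.mod_lt _ (by norm_num)
      have hbo : (x ||| y) % 2 < 2 := Nat.mod_lt _ (by norm_num)
      have hb' : ¬(x % 2 = 1 ∧ y % 2 = 1) := by
        intro ⟨ha, hbb⟩; simp [ha, hbb] at hand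
      have hor' : ((x ||| y) % 2 = 1) ↔ (x % 2 = 1 ∨ y % 2 = 1) := by
        by_cases h1 : x % 2 = 1 <;> by_cases h2' : y % 2 = 1 <;>
          simp [h1, h2'] at hor0 <;> simp [h1, h2', hor0]
      omega

lemma pv_and_disj_ldiff (m n : Nat) : (m &&& n) &&& Nat.ldiff m n = 0 := by
  apply Nat.eq_of_testBit_eq
  intro i
  simp only [Nat.testBit_and, Nat.testBit_ldiff, Nat.zero_testBit]
  cases m.testBit i <;> cases n.testBit i <;> rfl

lemma pv_and_add_ldiff (m n : Nat) : (m &&& n) + Nat.ldiff m n = m := by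
  rw [pv_disj_add _ _ (pv_and_disj_ldiff m n)]
  apply Nat.eq_of_testBit_eq
  intro i
  simp only [Nat.testBit_or, Nat.testBit_and, Nat.testBit_ldiff]
  cases m.testBit i <;> cases n.testBit i <;> rfl

lemma pv_sub_and (m n : Nat) : m - (m &&& n) = Nat.ldiff m n := by
  have := pv_and_add_ldiff m n; omega

-- PySem's band agrees with Mathlib's Int.land
lemma pv_band_eq_land (a b : Int) : PySem.Int.band a b = Int.land a b := by
  cases a with
  | ofNat m =>
    cases b with
    | ofNat n =>
      simp [PySem.Int.band, Int.land]
    | negSucc n =>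
      have h1 : ¬(0 : Int) ≤ Int.negSucc n := by simp [Int.negSucc_eq]; try omega
      have h2 : (-(Int.negSucc n) - 1).toNat = n := by simp [Int.negSucc_eq]; try omega
      simp [PySem.Int.band, h1, Int.land, pv_sub_and]
  | negSucc m =>
    have h1 : ¬(0 : Int) ≤ Int.negSucc m := by simp [Int.negSucc_eq]; try omega
    have h2 : (-(Int.negSucc m) - 1).toNat = m := by simp [Int.negSucc_eq]; try omega
    cases b with
    | ofNat n =>
      simp [PySem.Int.band, h1, Int.land, pv_sub_and]
    | negSucc n =>
      have h3 : ¬(0 : Int) ≤ Int.negSucc n := by simp [Int.negSucc_eq]; try omega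
      have h4 : (-(Int.negSucc n) - 1).toNat = n := by simp [Int.negSucc_eq]; try omega
      simp [PySem.Int.band, Int.land, Int.negSucc_eq]
      omega

lemma pv_testBit_band (a b : Int) (k : Nat) :
    (PySem.Int.band a b).testBit k = (a.testBit k && b.testBit k) := by
  rw [pv_band_eq_land]; exact Int.testBit_land a b k

lemma pv_not_eq_lnot (a : Int) : Int.not a = Int.lnot a := by cases a <;> rfl

lemma pv_testBit_not (a : Int) (k : Nat) : (Int.not a).testBit k = !a.testBit k := by
  rw [pv_not_eq_lnot]; exact Int.testBit_lnot a k

lemma pv_nat_and63 (m : Nat) : m &&& 63 = m % 64 := by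
  have := Nat.and_two_pow_sub_one_eq_mod m 6
  norm_num at this
  exact this

lemma pv_band63 (C : Int) : PySem.Int.band C 63 = C % 64 := by
  cases C with
  | ofNat m =>
    have h1 : PySem.Int.band (Int.ofNat m) 63 = ((m &&& 63 : Nat) : Int) := by
      simp [PySem.Int.band]
    rw [h1, pv_nat_and63]
    have : (Int.ofNat m) = (m : Int) := rfl
    rw [this]; omega
  | negSucc m =>
    have h1 : ¬(0 : Int) ≤ Int.negSucc m := by simp [Int.negSucc_eq]; try omega
    have h2 : (-(Int.negSucc m) - 1).toNat = m := by simp [Int.negSucc_eq]; try omega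
    have h3 : PySem.Int.band (Int.negSucc m) 63 = ((63 - (63 &&& m) : Nat) : Int) := by
      simp [PySem.Int.band, h1]
    rw [h3, Nat.and_comm, pv_nat_and63]
    have : Int.negSucc m = -(m : Int) - 1 := by simp [Int.negSucc_eq]; try omega
    rw [this]
    have hm : m % 64 < 64 := Nat.mod_lt _ (by norm_num)
    omega

-- (63 - r) holds the complemented low 6 bits of r
lemma pv_notbit : ∀ (r : Fin 64) (k : Fin 6), (63 - r.val).testBit k.val = !r.val.testBit k.val := by decide

lemma pv_notbit' (r k : Nat) (hr : r < 64) (hk : k < 6) : (63 - r).testBit k = !r.testBit k :=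
  pv_notbit ⟨r, hr⟩ ⟨k, hk⟩

-- low bits of an integer are the bits of its residue mod 64
lemma pv_tb_low (C : Int) (r k : Nat) (hr : C % 64 = (r : Int)) (hk : k < 6) :
    C.testBit k = r.testBit k := by
  have h64 : (64 : Nat) = 2 ^ 6 := by norm_num
  cases C with
  | ofNat m =>
    have hc : (Int.ofNat m) = (m : Int) := rfl
    rw [hc] at hr
    have hrm : r = m % 64 := by omega
    show m.testBit k = r.testBit k
    rw [hrm, h64, Nat.testBit_mod_two_pow]
    simp [hk]
  | negSucc m =>
    have hc : Int.negSucc m = -(m : Int) - 1 := by simp [Int.negSucc_eq]; try omega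
    rw [hc] at hr
    have hm : m % 64 < 64 := Nat.mod_lt _ (by norm_num)
    have hrm : r = 63 - m % 64 := by omega
    show (!m.testBit k) = r.testBit k
    have hmk : m.testBit k = (m % 64).testBit k := by
      rw [h64, Nat.testBit_mod_two_pow]; simp [hk]
    rw [hmk, hrm, pv_notbit' (m % 64) k hm hk]

-- mask engine: a band with 63 equals the 6-bit nat with the same low bits
lemma pv_mask (C : Int) (n : Nat) (hn : n < 64)
    (h : ∀ k, k < 6 → C.testBit k = n.testBit k) : PySem.Int.band C 63 = (n : Int) := by
  rw [pv_band63]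
  have h0 : 0 ≤ C % 64 := Int.emod_nonneg C (by norm_num)
  have h1 : C % 64 < 64 := Int.emod_lt_of_pos C (by norm_num)
  have hr : C % 64 = ((C % 64).toNat : Int) := by omega
  rw [hr]
  congr 1
  apply Nat.eq_of_testBit_eq
  intro i
  by_cases hi : i < 6
  · rw [← h i hi, pv_tb_low C ((C % 64).toNat) i hr hi]
  · have hb1 : (C % 64).toNat < 2 ^ i := by
      calc (C % 64).toNat < 64 := by omega
        _ = 2 ^ 6 := by norm_num
        _ ≤ 2 ^ i := Nat.pow_le_pow_right (by norm_num) (by omega)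
    have hb2 : n < 2 ^ i := by
      calc n < 64 := hn
        _ = 2 ^ 6 := by norm_num
        _ ≤ 2 ^ i := Nat.pow_le_pow_right (by norm_num) (by omega)
    rw [Nat.testBit_lt_two_pow hb1, Nat.testBit_lt_two_pow hb2]

-- bit test via division, over the finite range
lemma pv_bitfin : ∀ (r : Fin 64) (k : Fin 6), (r.val / 2 ^ k.val % 2 ≠ 0) ↔ r.val.testBit k.val = true := by decide

lemma pv_bitfin' (r k : Nat) (hr : r < 64) (hk : k < 6) :
    (r / 2 ^ k % 2 ≠ 0) ↔ r.testBit k = true := pv_bitfin ⟨r, hr⟩ ⟨k, hk⟩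

-- A's per-position condition in terms of the residue's bits
lemma pv_abit (X : Int) (r k : Nat) (hr : X % 64 = (r : Int)) (hk : k < 6) :
    (PySem.Int.band (X >>> k) 1 ≠ 0) ↔ (r.testBit k = true) := by
  rw [PySem.Int.band_one, PySem.Int.mod_eq_emod_of_pos (by norm_num), Int.shiftRight_eq_div_pow]
  have hr64 : r < 64 := by omega
  have harith : X / ((2 ^ k : Nat) : Int) % 2 = ((r / 2 ^ k % 2 : Nat) : Int) := by
    interval_cases k <;> (norm_num; omega)
  rw [harith, ← pv_bitfin' r k hr64 hk]
  constructor
  · intro h h'; exact h (by exact_mod_cast congrArg (Nat.cast : Nat → Int) h')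
  · intro h h'; exact h (by exact_mod_cast h')

lemma pv_step (acc : Int) (P : Prop) [Decidable P] :
    (if P then acc + 1 else acc) = acc + (if P then 1 else 0) := by split_ifs <;> ring

lemma pv_bridge (bg1 fg1 bg2 fg2 : Int) (x y : Bool) :
    (if (if x = true then fg1 else bg1) ≠ (if y = true then fg2 else bg2) then (1 : Int) else 0)
    = (if x && y then (1 : Int) else 0) * (if fg1 ≠ fg2 then 1 else 0)
      + (if x && !y then (1 : Int) else 0) * (if fg1 ≠ bg2 then 1 else 0)
      + (if !x && y then (1 : Int) else 0) * (if bg1 ≠ fg2 then 1 else 0)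
      + (if !x && !y then (1 : Int) else 0) * (if bg1 ≠ bg2 then 1 else 0) := by
  cases x <;> cases y <;> simp

-- the four popcounts as sums of per-position indicators (finite checks)
lemma pv_counts11 : ∀ (a b : Fin 64),
    (PySem.Int.bitCount ((a.val &&& b.val : Nat) : Int) : Int)
      = (if a.val.testBit 0 && b.val.testBit 0 then (1 : Int) else 0) + (if a.val.testBit 1 && b.val.testBit 1 then (1 : Int) else 0) + (if a.val.testBit 2 && b.val.testBit 2 then (1 : Int) else 0) + (if a.val.testBit 3 && b.val.testBit 3 then (1 : Int) else 0) + (if a.val.testBit 4 && b.val.testBit 4 then (1 : Int) else 0) + (if a.val.testBit 5 && b.val.testBit 5 then (1 : Int) else 0) := by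
  decide

lemma pv_counts10 : ∀ (a b : Fin 64),
    (PySem.Int.bitCount ((a.val &&& (63 - b.val) : Nat) : Int) : Int)
      = (if a.val.testBit 0 && !b.val.testBit 0 then (1 : Int) else 0) + (if a.val.testBit 1 && !b.val.testBit 1 then (1 : Int) else 0) + (if a.val.testBit 2 && !b.val.testBit 2 then (1 : Int) else 0) + (if a.val.testBit 3 && !b.val.testBit 3 then (1 : Int) else 0) + (if a.val.testBit 4 && !b.val.testBit 4 then (1 : Int) else 0) + (if a.val.testBit 5 && !b.val.testBit 5 then (1 : Int) else 0) := by
  decide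

lemma pv_counts01 : ∀ (a b : Fin 64),
    (PySem.Int.bitCount (((63 - a.val) &&& b.val : Nat) : Int) : Int)
      = (if !a.val.testBit 0 && b.val.testBit 0 then (1 : Int) else 0) + (if !a.val.testBit 1 && b.val.testBit 1 then (1 : Int) else 0) + (if !a.val.testBit 2 && b.val.testBit 2 then (1 : Int) else 0) + (if !a.val.testBit 3 && b.val.testBit 3 then (1 : Int) else 0) + (if !a.val.testBit 4 && b.val.testBit 4 then (1 : Int) else 0) + (if !a.val.testBit 5 && b.val.testBit 5 then (1 : Int) else 0) := by
  decide

lemma pv_counts00 : ∀ (a b : Fin 64),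
    (PySem.Int.bitCount (((63 - a.val) &&& (63 - b.val) : Nat) : Int) : Int)
      = (if !a.val.testBit 0 && !b.val.testBit 0 then (1 : Int) else 0) + (if !a.val.testBit 1 && !b.val.testBit 1 then (1 : Int) else 0) + (if !a.val.testBit 2 && !b.val.testBit 2 then (1 : Int) else 0) + (if !a.val.testBit 3 && !b.val.testBit 3 then (1 : Int) else 0) + (if !a.val.testBit 4 && !b.val.testBit 4 then (1 : Int) else 0) + (if !a.val.testBit 5 && !b.val.testBit 5 then (1 : Int) else 0) := by
  decide

lemma pv_and_lt (x y : Nat) (hy : y < 64) : x &&& y < 64 := by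
  have h2 : y < 2 ^ 6 := by norm_num; omega
  have := Nat.and_lt_two_pow x h2
  norm_num at this
  exact this

-- ===== VERDICT (by name: the statement is the Claim_ definition above) =====
theorem visual_pixel_diff_py_spec : Claim_equal_visual_pixel_diff_py := by
  intro bg1 fg1 idx1 bg2 fg2 idx2 _
  unfold Spec_visual_pixel_diff_py
  have e1 : 0 ≤ idx1 % 64 := Int.emod_nonneg _ (by norm_num)
  have e1' : idx1 % 64 < 64 := Int.emod_lt_of_pos _ (by norm_num)
  have e2 : 0 ≤ idx2 % 64 := Int.emod_nonneg _ (by norm_num)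
  have e2' : idx2 % 64 < 64 := Int.emod_lt_of_pos _ (by norm_num)
  set r1 : Nat := (idx1 % 64).toNat with hr1def
  set r2 : Nat := (idx2 % 64).toNat with hr2def
  have hr1 : idx1 % 64 = (r1 : Int) := by omega
  have hr2 : idx2 % 64 = (r2 : Int) := by omega
  have hb1 : r1 < 64 := by omega
  have hb2 : r2 < 64 := by omega
  have hA0 : (PySem.Int.band (idx1 >>> (0 : Int).toNat) 1 ≠ 0) ↔ r1.testBit 0 = true := pv_abit idx1 r1 0 hr1 (by norm_num)
  have hA1 : (PySem.Int.band (idx1 >>> (1 : Int).toNat) 1 ≠ 0) ↔ r1.testBit 1 = true := pv_abit idx1 r1 1 hr1 (by norm_num)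
  have hA2 : (PySem.Int.band (idx1 >>> (2 : Int).toNat) 1 ≠ 0) ↔ r1.testBit 2 = true := pv_abit idx1 r1 2 hr1 (by norm_num)
  have hA3 : (PySem.Int.band (idx1 >>> (3 : Int).toNat) 1 ≠ 0) ↔ r1.testBit 3 = true := pv_abit idx1 r1 3 hr1 (by norm_num)
  have hA4 : (PySem.Int.band (idx1 >>> (4 : Int).toNat) 1 ≠ 0) ↔ r1.testBit 4 = true := pv_abit idx1 r1 4 hr1 (by norm_num)
  have hA5 : (PySem.Int.band (idx1 >>> (5 : Int).toNat) 1 ≠ 0) ↔ r1.testBit 5 = true := pv_abit idx1 r1 5 hr1 (by norm_num)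
  have hB0 : (PySem.Int.band (idx2 >>> (0 : Int).toNat) 1 ≠ 0) ↔ r2.testBit 0 = true := pv_abit idx2 r2 0 hr2 (by norm_num)
  have hB1 : (PySem.Int.band (idx2 >>> (1 : Int).toNat) 1 ≠ 0) ↔ r2.testBit 1 = true := pv_abit idx2 r2 1 hr2 (by norm_num)
  have hB2 : (PySem.Int.band (idx2 >>> (2 : Int).toNat) 1 ≠ 0) ↔ r2.testBit 2 = true := pv_abit idx2 r2 2 hr2 (by norm_num)
  have hB3 : (PySem.Int.band (idx2 >>> (3 : Int).toNat) 1 ≠ 0) ↔ r2.testBit 3 = true := pv_abit idx2 r2 3 hr2 (by norm_num)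
  have hB4 : (PySem.Int.band (idx2 >>> (4 : Int).toNat) 1 ≠ 0) ↔ r2.testBit 4 = true := pv_abit idx2 r2 4 hr2 (by norm_num)
  have hB5 : (PySem.Int.band (idx2 >>> (5 : Int).toNat) 1 ≠ 0) ↔ r2.testBit 5 = true := pv_abit idx2 r2 5 hr2 (by norm_num)
  have m11 : PySem.Int.band (PySem.Int.band idx1 idx2) 63 = ((r1 &&& r2 : Nat) : Int) :=
    pv_mask _ _ (pv_and_lt r1 r2 hb2) (fun k hk => by
      rw [pv_testBit_band, pv_tb_low idx1 r1 k hr1 hk, pv_tb_low idx2 r2 k hr2 hk, Nat.testBit_and])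
  have m10 : PySem.Int.band (PySem.Int.band idx1 (Int.not idx2)) 63 = ((r1 &&& (63 - r2) : Nat) : Int) :=
    pv_mask _ _ (pv_and_lt r1 (63 - r2) (by omega)) (fun k hk => by
      rw [pv_testBit_band, pv_testBit_not, pv_tb_low idx1 r1 k hr1 hk, pv_tb_low idx2 r2 k hr2 hk,
        Nat.testBit_and, pv_notbit' r2 k hb2 hk])
  have m01 : PySem.Int.band (PySem.Int.band (Int.not idx1) idx2) 63 = (((63 - r1) &&& r2 : Nat) : Int) :=
    pv_mask _ _ (pv_and_lt (63 - r1) r2 hb2) (fun k hk => by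
      rw [pv_testBit_band, pv_testBit_not, pv_tb_low idx1 r1 k hr1 hk, pv_tb_low idx2 r2 k hr2 hk,
        Nat.testBit_and, pv_notbit' r1 k hb1 hk])
  have m00 : PySem.Int.band (PySem.Int.band (Int.not idx1) (Int.not idx2)) 63 = (((63 - r1) &&& (63 - r2) : Nat) : Int) :=
    pv_mask _ _ (pv_and_lt (63 - r1) (63 - r2) (by omega)) (fun k hk => by
      rw [pv_testBit_band, pv_testBit_not, pv_testBit_not, pv_tb_low idx1 r1 k hr1 hk,
        pv_tb_low idx2 r2 k hr2 hk, Nat.testBit_and, pv_notbit' r1 k hb1 hk, pv_notbit' r2 k hb2 hk])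
  have c11 := pv_counts11 ⟨r1, hb1⟩ ⟨r2, hb2⟩
  have c10 := pv_counts10 ⟨r1, hb1⟩ ⟨r2, hb2⟩
  have c01 := pv_counts01 ⟨r1, hb1⟩ ⟨r2, hb2⟩
  have c00 := pv_counts00 ⟨r1, hb1⟩ ⟨r2, hb2⟩
  unfold visual_pixel_diff_py visual_pixel_diff_py_alt
  rw [show PySem.List.pyRange 0 6 1 = [0, 1, 2, 3, 4, 5] from by decide]
  simp only [List.foldl, m11, m10, m01, m00, c11, c10, c01, c00]
  simp only [Int.shiftRight_natCast_right]
  simp only [hA0, hA1, hA2, hA3, hA4, hA5, hB0, hB1, hB2, hB3, hB4, hB5, pv_step]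
  simp only [pv_bridge]
  ring
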